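-- pv_equiv track=rewrite | github.com/codingfriend1/GHCN-Global-Historical-Climatology-Network-Annual-Anomalies | globals.py | generate_month_boundaries
-- ===== SOURCE A (Python) =====
-- def generate_month_boundaries(month_boundaries = [5,6,7,8], start_index_for_jan = 19):
--
--   absolute_month_boundaries = []
--
--   for month in range(0, 12):
--
--     start_index = start_index_for_jan + (month * month_boundaries[-1])
--
--     month_grouping = []
--
--     for mon_grouping_col in range(len(month_boundaries)):
--
--       start_bound = (start_index + month_boundaries[mon_grouping_col - 1]) if mon_grouping_col > 0 else start_index
--
--       end_bound = (start_index + month_boundaries[mon_grouping_col])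
--
--       absolute_month_boundaries.append((start_bound, end_bound))
--
--   return absolute_month_boundaries
-- ===== SOURCE B (Python) =====
-- def generate_month_boundaries(month_boundaries = [5,6,7,8], start_index_for_jan = 19):
--   # The boundaries chain: each tuple's start equals the previous tuple's end
--   # (within a month start+mb[i-1]=previous end, and across months the last end
--   # start+mb[-1] equals the next month's start index). So build the flat list
--   # of END bounds for all 12 months and pair each with its predecessor.
--   stride = month_boundaries[-1]
--   ends = [start_index_for_jan + month * stride + b
--           for month in range(12) for b in month_boundaries]
--   starts = [start_index_for_jan] + ends[:-1]
--   return list(zip(starts, ends))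
-- ===== Notes on version B (the rewrite author's own statement) =====
-- stated objective: alternative
-- what changed: B exploits the chaining invariant that each tuple's start equals the previous tuple's end: it builds the flat list of end bounds for all 12 months and zips it with its predecessor list (start followed by all but the last end), eliminating A's per-column conditional start-bound computation entirely.
import Mathlib
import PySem

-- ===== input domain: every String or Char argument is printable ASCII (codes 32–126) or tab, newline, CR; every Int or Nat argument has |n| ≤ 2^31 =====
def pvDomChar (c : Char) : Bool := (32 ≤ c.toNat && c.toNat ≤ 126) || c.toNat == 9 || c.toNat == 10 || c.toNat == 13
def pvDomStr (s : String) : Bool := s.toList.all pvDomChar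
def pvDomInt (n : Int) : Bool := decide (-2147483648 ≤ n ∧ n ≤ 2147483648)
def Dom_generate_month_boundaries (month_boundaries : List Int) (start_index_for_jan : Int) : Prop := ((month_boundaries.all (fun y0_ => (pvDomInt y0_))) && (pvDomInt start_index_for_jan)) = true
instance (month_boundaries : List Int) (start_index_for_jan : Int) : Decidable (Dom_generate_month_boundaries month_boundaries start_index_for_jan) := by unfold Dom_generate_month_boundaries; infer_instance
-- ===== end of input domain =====

-- B replaces A's nested month×column loop by a chaining view: every tuple's start equals
-- the previous tuple's end, so B builds the flat list of end bounds and zips it with its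
-- own predecessor list (start followed by all but the last end).

-- ===== PORT A =====
def generate_month_boundaries (month_boundaries : List Int) (start_index_for_jan : Int) : List (Int × Int) :=
  (PySem.List.pyRange 0 12 1).foldl (fun acc month =>
    let start_index := start_index_for_jan + month * PySem.List.pyGetD month_boundaries (-1) 0
    (PySem.List.pyRange 0 (month_boundaries.length : Int) 1).foldl (fun acc2 col =>
      let start_bound := if col > 0 then start_index + PySem.List.pyGetD month_boundaries (col - 1) 0 else start_index
      let end_bound := start_index + PySem.List.pyGetD month_boundaries col 0
      acc2 ++ [(start_bound, end_bound)]) acc) []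

-- ===== PORT B =====
def generate_month_boundaries_alt (month_boundaries : List Int) (start_index_for_jan : Int) : List (Int × Int) :=
  let stride := PySem.List.pyGetD month_boundaries (-1) 0
  let ends := (PySem.List.pyRange 0 12 1).flatMap (fun month =>
    month_boundaries.map (fun b => start_index_for_jan + month * stride + b))
  let starts := [start_index_for_jan] ++ PySem.List.slice ends none (some (-1))
  starts.zip ends

-- ===== PRECONDITION & SPEC =====
-- Pre_ excludes the empty list, on which both A and B raise IndexError at the last-element lookup.
def Pre_generate_month_boundaries (month_boundaries : List Int) (start_index_for_jan : Int) : Prop := month_boundaries ≠ []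
instance (month_boundaries : List Int) (start_index_for_jan : Int) : Decidable (Pre_generate_month_boundaries month_boundaries start_index_for_jan) := by unfold Pre_generate_month_boundaries; infer_instance
def pvWitness_generate_month_boundaries : List Int × Int := ([5,6,7,8], 19)
def Spec_generate_month_boundaries (month_boundaries : List Int) (start_index_for_jan : Int) (out : List (Int × Int)) : Prop := out = generate_month_boundaries_alt month_boundaries start_index_for_jan
instance (month_boundaries : List Int) (start_index_for_jan : Int) (out : List (Int × Int)) : Decidable (Spec_generate_month_boundaries month_boundaries start_index_for_jan out) := by unfold Spec_generate_month_boundaries; infer_instance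

-- ===== CLAIM =====
def Claim_equal_generate_month_boundaries : Prop := ∀ (month_boundaries : List Int) (start_index_for_jan : Int), Dom_generate_month_boundaries month_boundaries start_index_for_jan → Pre_generate_month_boundaries month_boundaries start_index_for_jan → Spec_generate_month_boundaries month_boundaries start_index_for_jan (generate_month_boundaries month_boundaries start_index_for_jan)

-- ===== LEMMAS AND PROOFS =====

-- chain pairs: pvPairs s [e1,e2,…] = [(s,e1),(e1,e2),…]
def pvPairs : Int → List Int → List (Int × Int)
  | _, [] => []
  | s, e :: es => (s, e) :: pvPairs e es

theorem pv_zip_pred (s : Int) (es : List Int) :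
    (s :: es.dropLast).zip es = pvPairs s es := by
  induction es generalizing s with
  | nil => rfl
  | cons e es ih =>
    cases es with
    | nil => rfl
    | cons e2 es' =>
      simp only [List.dropLast_cons₂, List.zip_cons_cons, pvPairs, ih e]

theorem pvPairs_append (s : Int) (l1 l2 : List Int) :
    pvPairs s (l1 ++ l2) = pvPairs s l1 ++ pvPairs (l1.getLastD s) l2 := by
  induction l1 generalizing s with
  | nil => rfl
  | cons a l1 ih => simp only [List.cons_append, pvPairs, List.getLastD_cons, ih a]

theorem pv_getLastD_append {α : Type} (l1 l2 : List α) (d : α) (h : l2 ≠ []) :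
    (l1 ++ l2).getLastD d = l2.getLastD d := by
  rw [List.getLastD_eq_getLast?, List.getLastD_eq_getLast?, List.getLast?_append_of_ne_nil _ h]

-- one month: A's index-based column map is the chain of the shifted end bounds
theorem pv_chunk_eq (mb : List Int) (si : Int) :
    (PySem.List.pyRange 0 (mb.length : Int) 1).map (fun col =>
      ((if col > 0 then si + PySem.List.pyGetD mb (col - 1) 0 else si),
       si + PySem.List.pyGetD mb col 0))
    = pvPairs si (mb.map (fun b => si + b)) := by
  induction mb using List.reverseRecOn with
  | nil => rfl
  | append_singleton l x ih =>
    have hlen : ((l ++ [x]).length : Int) = (l.length : Int) + 1 := by simp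
    rw [hlen, PySem.List.pyRange_one_succ_right (by omega), List.map_append, List.map_append,
        pvPairs_append]
    congr 1
    · rw [← ih]
      apply List.map_congr_left
      intro i hi
      rw [PySem.List.mem_pyRange_one] at hi
      have h1 : PySem.List.pyGetD (l ++ [x]) i 0 = PySem.List.pyGetD l i 0 := by
        rw [PySem.List.pyGetD_eq_getElem _ 0 hi.1 (by simp; omega),
            PySem.List.pyGetD_eq_getElem _ 0 hi.1 (by omega),
            List.getElem_append_left (by omega)]
      by_cases h0 : i > 0
      · have h2 : PySem.List.pyGetD (l ++ [x]) (i - 1) 0 = PySem.List.pyGetD l (i - 1) 0 := by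
          rw [PySem.List.pyGetD_eq_getElem _ 0 (by omega) (by simp; omega),
              PySem.List.pyGetD_eq_getElem _ 0 (by omega) (by omega),
              List.getElem_append_left (by omega)]
        simp [h0, h1, h2]
      · simp [h0, h1]
    · have hx : PySem.List.pyGetD (l ++ [x]) (l.length : Int) 0 = x := by
        rw [PySem.List.pyGetD_eq_getElem _ 0 (by omega) (by simp)]
        simp
      have hfst : (if (l.length : Int) > 0
            then si + PySem.List.pyGetD (l ++ [x]) ((l.length : Int) - 1) 0 else si)
          = (l.map (fun b => si + b)).getLastD si := by
        cases l with
        | nil => simp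
        | cons a l' =>
          rw [if_pos (by simp)]
          have hidx : ((a :: l').length : Int) - 1 = ((l'.length : Nat) : Int) := by
            simp
          rw [hidx, PySem.List.pyGetD_eq_getElem _ 0 (by omega) (by simp),
              List.getElem_append_left (by simp)]
          rw [List.getLastD_eq_getLast?,
              List.getLast?_eq_some_getLast (by simp : (a :: l').map (fun b => si + b) ≠ []),
              List.getLast_map]
          simp [List.getLast_eq_getElem]
      simp only [List.map_cons, List.map_nil, pvPairs, hx, hfst]

-- last end bound after k months
theorem pv_last_ends (mb : List Int) (s stride : Int) (h : mb ≠ [])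
    (hs : PySem.List.pyGetD mb (-1) 0 = mb.getLast h) (hstride : stride = PySem.List.pyGetD mb (-1) 0) (k : Nat) :
    (((PySem.List.pyRange 0 (k : Int) 1).flatMap (fun m =>
        mb.map (fun b => s + m * stride + b))).getLastD s) = s + k * stride := by
  induction k with
  | zero => simp [PySem.List.pyRange_one_eq_nil]
  | succ k ih =>
    rw [show ((k + 1 : Nat) : Int) = (k : Int) + 1 by push_cast; ring,
        PySem.List.pyRange_one_succ_right (by omega), List.flatMap_append]
    simp only [List.flatMap_cons, List.flatMap_nil, List.append_nil]
    rw [pv_getLastD_append _ _ _ (by simp [h])]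
    rw [List.getLastD_eq_getLast?,
        List.getLast?_eq_some_getLast (by simp [h] : mb.map (fun b => s + (k : Int) * stride + b) ≠ []),
        List.getLast_map]
    simp only [Option.getD_some]
    rw [← hs, ← hstride]; ring

-- the chain of all end bounds for k months = A's flat month chunks
theorem pv_months (mb : List Int) (s stride : Int) (h : mb ≠ [])
    (hs : PySem.List.pyGetD mb (-1) 0 = mb.getLast h) (hstride : stride = PySem.List.pyGetD mb (-1) 0) (k : Nat) :
    pvPairs s ((PySem.List.pyRange 0 (k : Int) 1).flatMap (fun m =>
        mb.map (fun b => s + m * stride + b)))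
    = (PySem.List.pyRange 0 (k : Int) 1).flatMap (fun m =>
        (PySem.List.pyRange 0 (mb.length : Int) 1).map (fun col =>
          ((if col > 0 then s + m * stride + PySem.List.pyGetD mb (col - 1) 0 else s + m * stride),
           s + m * stride + PySem.List.pyGetD mb col 0))) := by
  induction k with
  | zero => simp [PySem.List.pyRange_one_eq_nil, pvPairs]
  | succ k ih =>
    rw [show ((k + 1 : Nat) : Int) = (k : Int) + 1 by push_cast; ring,
        PySem.List.pyRange_one_succ_right (by omega), List.flatMap_append,
        List.flatMap_append, pvPairs_append, ih,
        pv_last_ends mb s stride h hs hstride k]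
    congr 1
    simp only [List.flatMap_cons, List.flatMap_nil, List.append_nil]
    rw [← pv_chunk_eq mb (s + k * stride)]

theorem generate_month_boundaries_eq (mb : List Int) (s : Int) (h : mb ≠ []) :
    generate_month_boundaries mb s = generate_month_boundaries_alt mb s := by
  unfold generate_month_boundaries generate_month_boundaries_alt
  simp only [PySem.List.foldl_append_singleton_eq_map]
  rw [PySem.List.foldl_append_eq_flatMap, List.nil_append]
  rw [PySem.List.slice_to_neg_one, List.singleton_append, pv_zip_pred]
  rw [show (12 : Int) = ((12 : Nat) : Int) by norm_num]
  exact (pv_months mb s (PySem.List.pyGetD mb (-1) 0) h (PySem.List.pyGetD_neg_one mb 0 h) rfl 12).symm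

-- ===== VERDICT =====
theorem generate_month_boundaries_spec : Claim_equal_generate_month_boundaries := by
  intro mb s _ hpre
  exact generate_month_boundaries_eq mb s hpre
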